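-- pv_equiv track=rewrite | github.com/revanth7667/Poker_Monte-Carlo | codes/evaluate.py | get_max_count
-- ===== SOURCE A (Python) =====
-- def get_max_count(hand, counts):
--     max_count = max(counts.values())
--     vals = list(counts.keys())
--     vals.sort(reverse=True)
--     for i in vals:
--         if counts[i] == max_count:
--             return (i, counts[i])
--         pass
--     pass
-- ===== SOURCE B (Python) =====
-- def get_max_count(hand, counts):
--     max_count = max(counts.values())
--     best = max(k for k in counts if counts[k] == max_count)
--     return (best, max_count)
-- ===== Notes on version B (the rewrite author's own statement) =====
-- stated objective: simpler
-- what changed: Replaces the descending sort of the keys plus a sentinel scan loop by a single linear max-reduction over the keys whose count equals the maximum count.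
import Mathlib
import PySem

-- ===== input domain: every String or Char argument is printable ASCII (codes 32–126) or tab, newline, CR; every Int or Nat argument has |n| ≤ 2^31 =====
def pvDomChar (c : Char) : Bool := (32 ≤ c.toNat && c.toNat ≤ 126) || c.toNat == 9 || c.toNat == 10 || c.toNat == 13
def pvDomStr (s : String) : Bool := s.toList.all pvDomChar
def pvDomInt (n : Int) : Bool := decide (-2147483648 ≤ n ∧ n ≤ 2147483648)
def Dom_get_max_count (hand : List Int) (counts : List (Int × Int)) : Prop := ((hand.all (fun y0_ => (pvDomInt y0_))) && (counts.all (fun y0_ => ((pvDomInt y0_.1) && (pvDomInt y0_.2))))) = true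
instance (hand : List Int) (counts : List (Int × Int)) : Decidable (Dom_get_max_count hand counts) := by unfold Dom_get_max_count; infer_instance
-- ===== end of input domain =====

-- B replaces A's descending key sort + first-match scan by one max-reduction over the keys with maximal count (simpler, no sort).

-- ===== PORT A =====
-- the 'for i in vals: if counts[i] == max_count: return ...' loop; Python falls off and returns None
-- only when no key matches, which cannot happen once max_count exists — (0, 0) is the unreachable fall-through
def getMaxLoopA (d : PySem.Dict Int Int) (m : Int) : List Int → Int × Int
  | [] => (0, 0)
  | i :: rest => if d.getD i 0 = m then (i, d.getD i 0) else getMaxLoopA d m rest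

def getMaxA (d : PySem.Dict Int Int) : Int × Int :=
  match PySem.List.max? d.values (fun v => v) with
  | none => (0, 0)  -- max() on empty raises ValueError; excluded by Pre_
  | some m => getMaxLoopA d m (PySem.List.sorted d.keys (fun k => k) true)

def get_max_count (hand : List Int) (counts : List (Int × Int)) : Int × Int :=
  getMaxA (PySem.Dict.ofList counts)

-- ===== PORT B =====
def getMaxAltB (d : PySem.Dict Int Int) : Int × Int :=
  match PySem.List.max? d.values (fun v => v) with
  | none => (0, 0)  -- max() on empty raises ValueError; excluded by Pre_
  | some m =>
    match PySem.List.max? (d.keys.filter (fun k => d.getD k 0 == m)) (fun k => k) with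
    | none => (0, 0)  -- unreachable: some key attains max_count
    | some best => (best, m)

def get_max_count_alt (hand : List Int) (counts : List (Int × Int)) : Int × Int :=
  getMaxAltB (PySem.Dict.ofList counts)

-- ===== PRECONDITION & SPEC =====
-- Pre_ excludes only the empty dict, on which A's max(counts.values()) raises ValueError.
def Pre_get_max_count (hand : List Int) (counts : List (Int × Int)) : Prop := counts ≠ []
instance (hand : List Int) (counts : List (Int × Int)) : Decidable (Pre_get_max_count hand counts) := by unfold Pre_get_max_count; infer_instance
def pvWitness_get_max_count : List Int × (List (Int × Int)) := ([2, 2, 5], [(2, 2), (5, 1)])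

def Spec_get_max_count (hand : List Int) (counts : List (Int × Int)) (out : Int × Int) : Prop := out = get_max_count_alt hand counts
instance (hand : List Int) (counts : List (Int × Int)) (out : Int × Int) : Decidable (Spec_get_max_count hand counts out) := by unfold Spec_get_max_count; infer_instance

-- ===== CLAIM (what is proved, stated in full; the proofs are below) =====
def Claim_equal_get_max_count : Prop := ∀ (hand : List Int) (counts : List (Int × Int)), Dom_get_max_count hand counts → Pre_get_max_count hand counts → Spec_get_max_count hand counts (get_max_count hand counts)

-- ===== LEMMAS AND PROOFS =====

-- on a descending list, the first element whose count is m is the max of those whose count is m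
lemma getMaxLoopA_eq_max (d : PySem.Dict Int Int) (m : Int) (xs : List Int)
    (hs : xs.Pairwise (fun a b => b ≤ a)) (b : Int)
    (hb : PySem.List.max? (xs.filter (fun k => d.getD k 0 == m)) (fun k => k) = some b) :
    getMaxLoopA d m xs = (b, d.getD b 0) := by
  induction xs with
  | nil =>
    simp only [List.filter_nil] at hb
    rw [(PySem.List.max?_eq_none_iff _ _).2 rfl] at hb
    simp at hb
  | cons x rest ih =>
    rcases List.pairwise_cons.1 hs with ⟨hx, hrest⟩
    by_cases hpx : d.getD x 0 = m
    · have hfilter : (x :: rest).filter (fun k => d.getD k 0 == m)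
          = x :: rest.filter (fun k => d.getD k 0 == m) := by
        simp [hpx]
      rw [hfilter] at hb
      have hbmem : b ∈ x :: rest.filter (fun k => d.getD k 0 == m) := PySem.List.max?_mem hb
      have hble : b ≤ x := by
        rcases List.mem_cons.1 hbmem with h | h
        · omega
        · exact hx b (List.mem_of_mem_filter h)
      have hxle : x ≤ b := PySem.List.max?_isMax hb x (List.mem_cons_self ..)
      have hbx : b = x := le_antisymm hble hxle
      simp [getMaxLoopA, hpx, hbx]
    · have hfilter : (x :: rest).filter (fun k => d.getD k 0 == m)
          = rest.filter (fun k => d.getD k 0 == m) := by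
        simp [hpx]
      rw [hfilter] at hb
      simp only [getMaxLoopA, if_neg hpx]
      exact ih hrest hb

-- max? with identity key returns the same element on any permutation
lemma max?_id_perm_eq {xs ys : List Int} (hp : xs.Perm ys) {b b' : Int}
    (hb : PySem.List.max? xs (fun k => k) = some b)
    (hb' : PySem.List.max? ys (fun k => k) = some b') : b = b' := by
  have h1 : b ≤ b' := PySem.List.max?_isMax hb' b (hp.mem_iff.1 (PySem.List.max?_mem hb))
  have h2 : b' ≤ b := PySem.List.max?_isMax hb b' (hp.symm.mem_iff.1 (PySem.List.max?_mem hb'))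
  omega

-- inserting into a dict leaves a nonempty items list
lemma items_insert_ne_nil (d : PySem.Dict Int Int) (k v : Int) :
    (d.insert k v).items ≠ [] := by
  rw [PySem.Dict.items_insert]
  split
  · rename_i hc
    intro h
    have hk := (PySem.Dict.contains_iff_mem_keys d k).1 hc
    simp only [PySem.Dict.keys, List.map_eq_nil_iff.1 h] at hk
    simp at hk
  · simp

-- a dict built from a nonempty pair list has a nonempty items list
lemma items_foldl_insert_ne_nil (l : List (Int × Int)) (d : PySem.Dict Int Int)
    (hd : d.items ≠ [] ∨ l ≠ []) :
    (l.foldl (fun d p => d.insert p.1 p.2) d).items ≠ [] := by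
  induction l generalizing d with
  | nil => simpa using hd
  | cons p rest ih => exact ih _ (Or.inl (items_insert_ne_nil d p.1 p.2))

theorem get_max_count_spec : Claim_equal_get_max_count := by
  intro hand counts _ hpre
  unfold Spec_get_max_count get_max_count get_max_count_alt
  set d := PySem.Dict.ofList counts with hd
  show getMaxA d = getMaxAltB d
  have hitems : d.items ≠ [] := by
    have := items_foldl_insert_ne_nil counts PySem.Dict.empty (Or.inr hpre)
    simpa [hd, PySem.Dict.ofList] using this
  have hvals : d.values ≠ [] := by
    simp only [PySem.Dict.values]
    exact fun h => hitems (List.map_eq_nil_iff.1 h)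
  obtain ⟨m, hm⟩ : ∃ m, PySem.List.max? d.values (fun v => v) = some m := by
    rcases h : PySem.List.max? d.values (fun v => v) with _ | m
    · exact absurd ((PySem.List.max?_eq_none_iff _ _).1 h) hvals
    · exact ⟨m, rfl⟩
  -- some key attains m
  have hmmem : m ∈ d.values := PySem.List.max?_mem hm
  obtain ⟨⟨k, v⟩, hkv, hvm⟩ : ∃ p ∈ d.items, p.2 = m := by
    simp only [PySem.Dict.values, List.mem_map] at hmmem
    rcases hmmem with ⟨p, hp, hpm⟩
    exact ⟨p, hp, hpm⟩
  have hnd : d.keys.Nodup := PySem.Dict.nodup_keys_ofList counts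
  have hkd : d.getD k 0 = m := by
    exact (PySem.Dict.getD_of_mem_items d hkv hnd 0).trans hvm
  have hkmem : k ∈ d.keys := PySem.Dict.mem_keys_of_mem_items d hkv
  have hkfil : k ∈ d.keys.filter (fun k => d.getD k 0 == m) := by
    simp [List.mem_filter, hkmem, hkd]
  obtain ⟨b', hb'⟩ : ∃ b', PySem.List.max? (d.keys.filter (fun k => d.getD k 0 == m)) (fun k => k) = some b' := by
    rcases h : PySem.List.max? (d.keys.filter (fun k => d.getD k 0 == m)) (fun k => k) with _ | b'
    · rw [(PySem.List.max?_eq_none_iff _ _).1 h] at hkfil; simp at hkfil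
    · exact ⟨b', rfl⟩
  have hperm : (PySem.List.sorted d.keys (fun k => k) true).Perm d.keys := PySem.List.sorted_perm ..
  have hpermf : ((PySem.List.sorted d.keys (fun k => k) true).filter (fun k => d.getD k 0 == m)).Perm
      (d.keys.filter (fun k => d.getD k 0 == m)) := hperm.filter _
  obtain ⟨b, hb⟩ : ∃ b, PySem.List.max? ((PySem.List.sorted d.keys (fun k => k) true).filter (fun k => d.getD k 0 == m)) (fun k => k) = some b := by
    rcases h : PySem.List.max? ((PySem.List.sorted d.keys (fun k => k) true).filter (fun k => d.getD k 0 == m)) (fun k => k) with _ | b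
    · have := (PySem.List.max?_eq_none_iff _ _).1 h
      rw [this] at hpermf
      rw [hpermf.symm.eq_nil] at hkfil  -- nil perm
      simp at hkfil
    · exact ⟨b, rfl⟩
  have hbb' : b = b' := max?_id_perm_eq hpermf hb hb'
  have hsorted : (PySem.List.sorted d.keys (fun k => k) true).Pairwise (fun a b => b ≤ a) := by
    have := PySem.List.sorted_pairwise_rev d.keys (fun k => k)
    simpa using this
  have hloop := getMaxLoopA_eq_max d m _ hsorted b hb
  have hbm : d.getD b 0 = m := by
    have hbmem := PySem.List.max?_mem hb
    have := List.mem_filter.1 (hpermf.mem_iff.1 hbmem)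
    simpa using this.2
  unfold getMaxA getMaxAltB
  simp only [hm, hb']
  rw [hloop, hbm, hbb']
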